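-- pv_equiv track=rewrite | github.com/zposch/bookbot | main.py | characterFormat
-- ===== SOURCE A (Python) =====
-- def characterFormat(text): # Takes the wordCount as input and further splits it into characters
--     wordList = text.split()
--     characters = []
--
--     for word in wordList:
--         words = list(word)
--         for character in words:
--             character.lower()
--             characters.append(character)
--
--     return characters
-- ===== SOURCE B (Python) =====
-- def characterFormat(text):
--     # Single filtering pass over the characters; no intermediate word list.
--     return [c for c in text if not c.isspace()]
-- ===== Notes on version B (the rewrite author's own statement) =====
-- stated objective: simpler
-- what changed: Replaces split-into-words followed by a nested per-word character loop (with a discarded .lower() call) by one direct filtering pass over the characters of text keeping the non-whitespace ones.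
import Mathlib
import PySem

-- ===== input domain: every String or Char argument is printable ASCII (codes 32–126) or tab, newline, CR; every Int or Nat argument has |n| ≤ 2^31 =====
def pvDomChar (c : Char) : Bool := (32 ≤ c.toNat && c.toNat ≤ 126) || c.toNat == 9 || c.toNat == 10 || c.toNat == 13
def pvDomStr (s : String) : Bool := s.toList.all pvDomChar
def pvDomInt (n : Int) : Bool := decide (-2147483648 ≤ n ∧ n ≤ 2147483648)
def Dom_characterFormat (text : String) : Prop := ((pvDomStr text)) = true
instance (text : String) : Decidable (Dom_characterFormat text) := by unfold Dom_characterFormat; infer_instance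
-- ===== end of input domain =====

-- B replaces A's split-into-words + nested per-word loop (whose .lower() result is discarded)
-- by a single filtering pass over the characters; objective: simpler.

-- ===== PORT A =====
-- wordList = text.split(); for word in wordList: for character in list(word): character.lower() (discarded); characters.append(character)
def characterFormat (text : String) : List String :=
  let wordList := PySem.Chars.split₀ text.toList
  wordList.foldl (fun characters word =>
    let words := word
    words.foldl (fun chars character =>
      let _ := PySem.Chars.lowerChar character  -- character.lower(): result discarded, as in A
      chars ++ [String.ofList [character]]) characters) []

-- ===== PORT B =====
-- return [c for c in text if not c.isspace()]
def characterFormat_alt (text : String) : List String :=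
  (text.toList.filter (fun c => !PySem.Chars.isspace c)).map (fun c => String.ofList [c])

-- ===== PRECONDITION & SPEC =====
def Spec_characterFormat (text : String) (out : List String) : Prop := out = characterFormat_alt text
instance (text : String) (out : List String) : Decidable (Spec_characterFormat text out) := by unfold Spec_characterFormat; infer_instance

-- ===== CLAIM (what is proved, stated in full; the proofs are below) =====
def Claim_equal_characterFormat : Prop := ∀ (text : String), Dom_characterFormat text → Spec_characterFormat text (characterFormat text)

-- ===== LEMMAS AND PROOFS =====

-- split₀.go invariant: the concatenation of the produced words is exactly the non-whitespace characters.
theorem pv_go_flatten (s cur : List Char) (acc : List (List Char)) :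
    (PySem.Chars.split₀.go s cur acc).flatten
      = acc.reverse.flatten ++ cur.reverse ++ s.filter (fun c => !PySem.Chars.isspace c) := by
  induction s generalizing cur acc with
  | nil =>
      simp only [PySem.Chars.split₀.go]
      by_cases h : cur = []
      · subst h; simp
      · rw [if_neg (by simpa using h)]; simp
  | cons c rest ih =>
      simp only [PySem.Chars.split₀.go]
      by_cases hs : PySem.Chars.isspace c = true
      · rw [if_pos hs]
        by_cases h : cur = []
        · subst h
          rw [if_pos (by simp)]
          simp [ih, hs]
        · rw [if_neg (by simpa using h)]
          simp [ih, hs]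
      · rw [if_neg hs]
        simp [ih, hs]

theorem pv_split_flatten (cs : List Char) :
    (PySem.Chars.split₀ cs).flatten = cs.filter (fun c => !PySem.Chars.isspace c) := by
  simpa using pv_go_flatten cs [] []

theorem pv_inner (w : List Char) (out : List String) :
    w.foldl (fun chars character =>
        let _ := PySem.Chars.lowerChar character
        chars ++ [String.ofList [character]]) out
      = out ++ w.map (fun c => String.ofList [c]) := by
  induction w generalizing out with
  | nil => simp
  | cons c rest ih => simp [ih]

theorem pv_flat_single (w : List Char) :
    (List.map (fun c => [String.ofList [c]]) w).flatten = List.map (fun c => String.ofList [c]) w := by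
  induction w with
  | nil => rfl
  | cons c rest ih => simp [ih]

theorem pv_outer (ws : List (List Char)) (out : List String) :
    ws.foldl (fun characters word =>
        word.foldl (fun chars character =>
          let _ := PySem.Chars.lowerChar character
          chars ++ [String.ofList [character]]) characters) out
      = out ++ ws.flatten.map (fun c => String.ofList [c]) := by
  induction ws generalizing out with
  | nil => simp
  | cons w rest ih => simp [pv_inner, pv_flat_single]

-- ===== VERDICT (by name: the statement is the Claim_ definition above) =====
theorem characterFormat_spec : Claim_equal_characterFormat := by
  intro text _
  unfold Spec_characterFormat characterFormat characterFormat_alt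
  simp only [pv_outer, pv_split_flatten, List.nil_append]
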